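-- pv_equiv track=rewrite | github.com/ekomissarov/colabimport | colab/sunset.py | triad
-- ===== SOURCE A (Python) =====
-- def triad(item):
--     t = [
--         {"vol": "clicks", "conv": "ctr", "cost_per": "cpc"},
--         {"vol": "events", "conv": "ev_per_click", "cost_per": "cpa"},
--         {"vol": "ev_contacts", "conv": "contacts_per_click", "cost_per": "cp_contact"},
--         {"vol": "events_ss", "conv": "ev_ss_per_click", "cost_per": "cpa_ss"},
--         {"vol": "events_fdv", "conv": "ev_fdv_per_click", "cost_per": "cpa_fdv"},
--         {"vol": "events_commercial", "conv": "ev_commercial_per_click", "cost_per": "cpa_commercial"},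
--         {"vol": "events_salesub", "conv": "ev_salesub_per_click", "cost_per": "cpa_salesub"},
--         {"vol": "events_rentsub", "conv": "ev_rentsub_per_click", "cost_per": "cpa_rentsub"},
--         {"vol": "events_saleflats", "conv": "ev_saleflats_per_click", "cost_per": "cpa_saleflats"},
--         {"vol": "events_rentflats", "conv": "ev_applications_per_click", "cost_per": "cpa_rentflats"},
--         {"vol": "events_applications", "conv": "ev_applications_per_click", "cost_per": "cpa_applications"},
--         {"vol": "ads", "conv": "ad_per_click", "cost_per": "cpad"},
--         {"vol": "ipotek", "conv": "ipotek_per_click", "cost_per": "cpa_ipotek"},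
--         {"vol": "ct", "conv": "ct_per_click", "cost_per": "cpa_ct"},
--
--         {"vol": "assisted_conv_phones", "conv": "", "cost_per": "assisted_ev_per_click"},
--         {"vol": "assisted_conv_ss", "conv": "", "cost_per": "assisted_ss_per_click"},
--         {"vol": "assisted_conv_reappl", "conv": "", "cost_per": "assisted_reappl_per_click"},
--         {"vol": "assisted_conv_ads", "conv": "", "cost_per": "assisted_ad_per_click"},
--         {"vol": "assisted_conv_mortgage", "conv": "", "cost_per": "assisted_ipotek_per_click"},
--         {"vol": "assisted_conv_ct", "conv": "", "cost_per": "assisted_ct_per_click"},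
--
--         #{"vol": "conv_agg_full", "conv": "agg_full_per_click", "cost_per": "cp_agg_full"},
--         {"vol": "ev_contacts", "conv": "contacts_per_click", "cost_per": "cp_contact"},
--         #{"vol": "conv_agg_owners", "conv": "agg_owners_per_click", "cost_per": "cp_agg_owners"},
--     ]
--     a_flag = ""
--     if item.startswith("A_"):
--         a_flag = "A_"
--         item = item.replace("A_", "")
--
--     for i in t:
--         if item in set(i.values()):
--             return {k[0]: f"{a_flag}{k[1]}" for k in i.items()}
-- ===== SOURCE B (Python) =====
-- _TEMPLATES = [
--     ("clicks", "ctr", "cpc"),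
--     ("events", "ev_per_click", "cpa"),
--     ("ev_contacts", "contacts_per_click", "cp_contact"),
--     ("events_ss", "ev_ss_per_click", "cpa_ss"),
--     ("events_fdv", "ev_fdv_per_click", "cpa_fdv"),
--     ("events_commercial", "ev_commercial_per_click", "cpa_commercial"),
--     ("events_salesub", "ev_salesub_per_click", "cpa_salesub"),
--     ("events_rentsub", "ev_rentsub_per_click", "cpa_rentsub"),
--     ("events_saleflats", "ev_saleflats_per_click", "cpa_saleflats"),
--     ("events_rentflats", "ev_applications_per_click", "cpa_rentflats"),
--     ("events_applications", "ev_applications_per_click", "cpa_applications"),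
--     ("ads", "ad_per_click", "cpad"),
--     ("ipotek", "ipotek_per_click", "cpa_ipotek"),
--     ("ct", "ct_per_click", "cpa_ct"),
--     ("assisted_conv_phones", "", "assisted_ev_per_click"),
--     ("assisted_conv_ss", "", "assisted_ss_per_click"),
--     ("assisted_conv_reappl", "", "assisted_reappl_per_click"),
--     ("assisted_conv_ads", "", "assisted_ad_per_click"),
--     ("assisted_conv_mortgage", "", "assisted_ipotek_per_click"),
--     ("assisted_conv_ct", "", "assisted_ct_per_click"),
--     ("ev_contacts", "contacts_per_click", "cp_contact"),
-- ]
--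
-- # reverse-lookup index built once: value -> its template triple, first occurrence wins
-- _REV = {}
-- for _t in _TEMPLATES:
--     for _v in _t:
--         _REV.setdefault(_v, _t)
--
--
-- def triad(item):
--     a_flag = ""
--     if item.startswith("A_"):
--         a_flag = "A_"
--         item = item.replace("A_", "")
--     tpl = _REV.get(item)
--     if tpl is None:
--         return None
--     vol, conv, cost = tpl
--     return {"vol": a_flag + vol, "conv": a_flag + conv, "cost_per": a_flag + cost}
-- ===== Notes on version B (the rewrite author's own statement) =====
-- stated objective: idiomatic
-- what changed: A scans the list of 21 template dicts on every call, building a value-set per dict; B builds one module-level reverse dict (value -> template triple, first occurrence wins via setdefault) once and answers each call with a single dict lookup.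
import Mathlib
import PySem

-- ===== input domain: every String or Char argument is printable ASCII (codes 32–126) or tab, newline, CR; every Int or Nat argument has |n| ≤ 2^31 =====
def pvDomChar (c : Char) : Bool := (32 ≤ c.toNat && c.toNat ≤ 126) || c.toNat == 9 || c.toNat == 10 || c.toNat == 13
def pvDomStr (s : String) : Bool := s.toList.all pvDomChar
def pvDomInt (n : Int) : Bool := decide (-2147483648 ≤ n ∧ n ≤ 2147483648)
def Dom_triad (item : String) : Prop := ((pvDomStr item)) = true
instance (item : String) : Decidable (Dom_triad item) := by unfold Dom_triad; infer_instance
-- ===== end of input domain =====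

-- B replaces A's per-call linear scan over the template dicts by a reverse-lookup
-- dict built once (value → template, first occurrence wins) and a single lookup (objective: idiomatic).

-- ===== PORT A =====
-- A's literal table of dicts
def tA : List (PySem.Dict String String) := [
  PySem.Dict.mk [("vol", "clicks"), ("conv", "ctr"), ("cost_per", "cpc")],
  PySem.Dict.mk [("vol", "events"), ("conv", "ev_per_click"), ("cost_per", "cpa")],
  PySem.Dict.mk [("vol", "ev_contacts"), ("conv", "contacts_per_click"), ("cost_per", "cp_contact")],
  PySem.Dict.mk [("vol", "events_ss"), ("conv", "ev_ss_per_click"), ("cost_per", "cpa_ss")],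
  PySem.Dict.mk [("vol", "events_fdv"), ("conv", "ev_fdv_per_click"), ("cost_per", "cpa_fdv")],
  PySem.Dict.mk [("vol", "events_commercial"), ("conv", "ev_commercial_per_click"), ("cost_per", "cpa_commercial")],
  PySem.Dict.mk [("vol", "events_salesub"), ("conv", "ev_salesub_per_click"), ("cost_per", "cpa_salesub")],
  PySem.Dict.mk [("vol", "events_rentsub"), ("conv", "ev_rentsub_per_click"), ("cost_per", "cpa_rentsub")],
  PySem.Dict.mk [("vol", "events_saleflats"), ("conv", "ev_saleflats_per_click"), ("cost_per", "cpa_saleflats")],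
  PySem.Dict.mk [("vol", "events_rentflats"), ("conv", "ev_applications_per_click"), ("cost_per", "cpa_rentflats")],
  PySem.Dict.mk [("vol", "events_applications"), ("conv", "ev_applications_per_click"), ("cost_per", "cpa_applications")],
  PySem.Dict.mk [("vol", "ads"), ("conv", "ad_per_click"), ("cost_per", "cpad")],
  PySem.Dict.mk [("vol", "ipotek"), ("conv", "ipotek_per_click"), ("cost_per", "cpa_ipotek")],
  PySem.Dict.mk [("vol", "ct"), ("conv", "ct_per_click"), ("cost_per", "cpa_ct")],
  PySem.Dict.mk [("vol", "assisted_conv_phones"), ("conv", ""), ("cost_per", "assisted_ev_per_click")],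
  PySem.Dict.mk [("vol", "assisted_conv_ss"), ("conv", ""), ("cost_per", "assisted_ss_per_click")],
  PySem.Dict.mk [("vol", "assisted_conv_reappl"), ("conv", ""), ("cost_per", "assisted_reappl_per_click")],
  PySem.Dict.mk [("vol", "assisted_conv_ads"), ("conv", ""), ("cost_per", "assisted_ad_per_click")],
  PySem.Dict.mk [("vol", "assisted_conv_mortgage"), ("conv", ""), ("cost_per", "assisted_ipotek_per_click")],
  PySem.Dict.mk [("vol", "assisted_conv_ct"), ("conv", ""), ("cost_per", "assisted_ct_per_click")],
  PySem.Dict.mk [("vol", "ev_contacts"), ("conv", "contacts_per_click"), ("cost_per", "cp_contact")]]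

-- A's 'for i in t: if item in set(i.values()): return {k[0]: a_flag+k[1] for k in i.items()}'
def triadLoop (aFlag s : String) : List (PySem.Dict String String) → Option (List (String × String))
  | [] => none
  | i :: rest =>
    if PySem.Set.contains (PySem.Set.ofList i.values) s then
      some ((i.items.foldl (fun d k => d.insert k.1 (aFlag ++ k.2)) PySem.Dict.empty).items)
    else triadLoop aFlag s rest

def triad (item : String) : Option (List (String × String)) :=
  let aFlag := if PySem.Str.startswith item "A_" then "A_" else ""
  let item' := if PySem.Str.startswith item "A_" then PySem.Str.replace item "A_" "" else item
  triadLoop aFlag item' tA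

-- ===== PORT B =====
-- B's flat template list
def templatesB : List (String × String × String) := [
  ("clicks", "ctr", "cpc"),
  ("events", "ev_per_click", "cpa"),
  ("ev_contacts", "contacts_per_click", "cp_contact"),
  ("events_ss", "ev_ss_per_click", "cpa_ss"),
  ("events_fdv", "ev_fdv_per_click", "cpa_fdv"),
  ("events_commercial", "ev_commercial_per_click", "cpa_commercial"),
  ("events_salesub", "ev_salesub_per_click", "cpa_salesub"),
  ("events_rentsub", "ev_rentsub_per_click", "cpa_rentsub"),
  ("events_saleflats", "ev_saleflats_per_click", "cpa_saleflats"),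
  ("events_rentflats", "ev_applications_per_click", "cpa_rentflats"),
  ("events_applications", "ev_applications_per_click", "cpa_applications"),
  ("ads", "ad_per_click", "cpad"),
  ("ipotek", "ipotek_per_click", "cpa_ipotek"),
  ("ct", "ct_per_click", "cpa_ct"),
  ("assisted_conv_phones", "", "assisted_ev_per_click"),
  ("assisted_conv_ss", "", "assisted_ss_per_click"),
  ("assisted_conv_reappl", "", "assisted_reappl_per_click"),
  ("assisted_conv_ads", "", "assisted_ad_per_click"),
  ("assisted_conv_mortgage", "", "assisted_ipotek_per_click"),
  ("assisted_conv_ct", "", "assisted_ct_per_click"),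
  ("ev_contacts", "contacts_per_click", "cp_contact")]

-- B's module-level reverse index: value → template, first occurrence wins (setdefault)
def revmap : PySem.Dict String (String × String × String) :=
  templatesB.foldl
    (fun d t => [t.1, t.2.1, t.2.2].foldl (fun d v => d.setdefault v t) d)
    PySem.Dict.empty

def triad_alt (item : String) : Option (List (String × String)) :=
  let aFlag := if PySem.Str.startswith item "A_" then "A_" else ""
  let item' := if PySem.Str.startswith item "A_" then PySem.Str.replace item "A_" "" else item
  match revmap.get? item' with
  | none => none
  | some t => some [("vol", aFlag ++ t.1), ("conv", aFlag ++ t.2.1), ("cost_per", aFlag ++ t.2.2)]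

-- ===== PRECONDITION & SPEC =====
def Spec_triad (item : String) (out : Option (List (String × String))) : Prop := out = triad_alt item
instance (item : String) (out : Option (List (String × String))) : Decidable (Spec_triad item out) := by unfold Spec_triad; infer_instance

-- ===== CLAIM (what is proved, stated in full; the proofs are below) =====
def Claim_equal_triad : Prop := ∀ (item : String), Dom_triad item → Spec_triad item (triad item)

-- ===== LEMMAS AND PROOFS =====

-- a template triple rendered as A's dict
def toDictT (t : String × String × String) : PySem.Dict String String :=
  PySem.Dict.mk [("vol", t.1), ("conv", t.2.1), ("cost_per", t.2.2)]

-- first template whose values contain s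
def findT : List (String × String × String) → String → Option (String × String × String)
  | [], _ => none
  | t :: rest, s => if s == t.1 || s == t.2.1 || s == t.2.2 then some t else findT rest s

lemma tA_eq : tA = templatesB.map toDictT := by rfl

lemma contains_values (t : String × String × String) (s : String) :
    PySem.Set.contains (PySem.Set.ofList (toDictT t).values) s
      = (s == t.1 || s == t.2.1 || s == t.2.2) := by
  rcases t with ⟨a, b, c⟩
  simp only [toDictT, PySem.Dict.values]
  rw [Bool.eq_iff_iff]
  simp [PySem.Set.contains, PySem.Set.mem_ofList]
  tauto

lemma build_items (aFlag : String) (t : String × String × String) :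
    ((toDictT t).items.foldl (fun d k => d.insert k.1 (aFlag ++ k.2)) PySem.Dict.empty).items
      = [("vol", aFlag ++ t.1), ("conv", aFlag ++ t.2.1), ("cost_per", aFlag ++ t.2.2)] := by
  rcases t with ⟨a, b, c⟩
  rfl

lemma loop_eq_find (aFlag s : String) (L : List (String × String × String)) :
    triadLoop aFlag s (L.map toDictT)
      = match findT L s with
        | none => none
        | some t => some [("vol", aFlag ++ t.1), ("conv", aFlag ++ t.2.1), ("cost_per", aFlag ++ t.2.2)] := by
  induction L with
  | nil => rfl
  | cons t rest ih =>
    simp only [List.map_cons, triadLoop, findT, contains_values, build_items]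
    by_cases h : (s == t.1 || s == t.2.1 || s == t.2.2) = true
    · simp [h]
    · simp [h, ih]

lemma get?_setdefault (d : PySem.Dict String (String × String × String))
    (k : String) (v : String × String × String) (s : String) :
    (d.setdefault k v).get? s = (d.get? s).or (if k == s then some v else none) := by
  simp only [PySem.Dict.setdefault]
  by_cases hc : d.contains k = true
  · simp only [hc, if_true]
    by_cases hks : k = s
    · subst hks
      rw [PySem.Dict.contains_eq_isSome_get?] at hc
      cases h : d.get? k with
      | none => simp [h] at hc
      | some w => simp
    · simp [beq_iff_eq, hks]
  · simp only [hc]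
    by_cases hks : k = s
    · subst hks
      rw [PySem.Dict.contains_eq_isSome_get?] at hc
      simp only [PySem.Dict.get?] at *
      cases h : List.find? (fun p => p.1 == k) d.items with
      | some w => simp [h] at hc
      | none => simp [h]
    · simp only [PySem.Dict.get?]
      simp [beq_iff_eq, hks]

lemma get?_step (d : PySem.Dict String (String × String × String))
    (t : String × String × String) (s : String) :
    ([t.1, t.2.1, t.2.2].foldl (fun d v => d.setdefault v t) d).get? s
      = (d.get? s).or (if s == t.1 || s == t.2.1 || s == t.2.2 then some t else none) := by
  simp only [List.foldl_cons, List.foldl_nil, get?_setdefault]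
  by_cases h1 : t.1 = s
  · simp [beq_iff_eq, h1]
  · by_cases h2 : t.2.1 = s
    · simp [beq_iff_eq, h1, h2]
    · by_cases h3 : t.2.2 = s
      · simp [beq_iff_eq, h1, h2, h3]
      · simp [beq_iff_eq, Ne.symm h1, Ne.symm h2, Ne.symm h3, h1, h2, h3]

lemma get?_fold (L : List (String × String × String))
    (d : PySem.Dict String (String × String × String)) (s : String) :
    (L.foldl (fun d t => [t.1, t.2.1, t.2.2].foldl (fun d v => d.setdefault v t) d) d).get? s
      = (d.get? s).or (findT L s) := by
  induction L generalizing d with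
  | nil => simp [findT]
  | cons t rest ih =>
    rw [List.foldl_cons, ih, get?_step]
    by_cases hc : (s == t.1 || s == t.2.1 || s == t.2.2) = true
    · simp only [findT, hc, if_true, Option.or_assoc]
      simp
    · simp only [findT, hc]
      simp only [Bool.not_eq_true] at hc
      simp

lemma revmap_get? (s : String) : revmap.get? s = findT templatesB s := by
  unfold revmap
  rw [get?_fold]
  simp [PySem.Dict.get?_empty]

-- ===== VERDICT (by name: the statement is the Claim_ definition above) =====
set_option maxRecDepth 4096 in
theorem triad_spec : Claim_equal_triad := by
  intro item _
  show triad item = triad_alt item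
  unfold triad triad_alt
  rw [tA_eq, loop_eq_find]
  simp only [revmap_get?]
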